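-- pv_equiv track=rewrite | github.com/theontho/wgsextract-cli | src/wgsextract_cli/commands/deps.py | _pacman_packages_for_tools
-- ===== SOURCE A (Python) =====
-- PACMAN_TOOL_PACKAGES = {
--     "samtools": "mingw-w64-ucrt-x86_64-samtools",
--     "bcftools": "mingw-w64-ucrt-x86_64-bcftools",
--     "tabix": "mingw-w64-ucrt-x86_64-htslib",
--     "bgzip": "mingw-w64-ucrt-x86_64-htslib",
--     "htsfile": "mingw-w64-ucrt-x86_64-htslib",
--     "gzip": "gzip",
--     "tar": "tar",
-- }
--
-- def _pacman_packages_for_tools(tools: list[str]) -> list[str]: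
--     packages = []
--     seen: set[str] = set()
--     for tool in tools:
--         package = PACMAN_TOOL_PACKAGES.get(tool)
--         if package and package not in seen:
--             seen.add(package)
--             packages.append(package)
--     return packages
-- ===== SOURCE B (Python) =====
-- PACMAN_TOOL_PACKAGES = {
--     "samtools": "mingw-w64-ucrt-x86_64-samtools",
--     "bcftools": "mingw-w64-ucrt-x86_64-bcftools",
--     "tabix": "mingw-w64-ucrt-x86_64-htslib",
--     "bgzip": "mingw-w64-ucrt-x86_64-htslib",
--     "htsfile": "mingw-w64-ucrt-x86_64-htslib",
--     "gzip": "gzip",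
--     "tar": "tar",
-- }
--
-- def _pacman_packages_for_tools(tools: list[str]) -> list[str]:
--     # Traverse the tools BACK-TO-FRONT; prepend each mapped package and purge any
--     # later duplicate of it from the accumulator, so the front (earliest) occurrence
--     # wins without any auxiliary seen-set.
--     packages: list[str] = []
--     for tool in reversed(tools):
--         package = PACMAN_TOOL_PACKAGES.get(tool)
--         if package:
--             packages = [package] + [p for p in packages if p != package]
--     return packages
-- ===== Notes on version B (the rewrite author's own statement) =====
-- stated objective: alternative
-- what changed: Instead of a forward pass with a manual seen-set, B traverses the tools back-to-front with no seen structure: each mapped package is prepended to the accumulator and any later duplicate of it is purged from the accumulator, so the earliest occurrence ends up first.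
import Mathlib
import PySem

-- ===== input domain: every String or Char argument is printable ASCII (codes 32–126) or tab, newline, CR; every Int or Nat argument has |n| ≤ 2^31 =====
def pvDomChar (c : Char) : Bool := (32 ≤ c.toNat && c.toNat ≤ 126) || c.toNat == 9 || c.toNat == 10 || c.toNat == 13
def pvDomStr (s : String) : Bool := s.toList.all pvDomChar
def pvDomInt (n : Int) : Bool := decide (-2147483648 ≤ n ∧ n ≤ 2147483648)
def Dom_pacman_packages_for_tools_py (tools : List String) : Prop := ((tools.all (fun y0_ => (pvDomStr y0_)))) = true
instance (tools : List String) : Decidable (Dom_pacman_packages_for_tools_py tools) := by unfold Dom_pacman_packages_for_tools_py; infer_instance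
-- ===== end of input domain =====

-- B traverses the tools back-to-front with no seen-set: it prepends each mapped package and
-- purges later duplicates from the accumulator, instead of A's forward seen-set loop (alternative).

-- ===== PORT A =====
def pacmanToolPackages : PySem.Dict String String :=
  PySem.Dict.ofList
    [("samtools", "mingw-w64-ucrt-x86_64-samtools"),
     ("bcftools", "mingw-w64-ucrt-x86_64-bcftools"),
     ("tabix", "mingw-w64-ucrt-x86_64-htslib"),
     ("bgzip", "mingw-w64-ucrt-x86_64-htslib"),
     ("htsfile", "mingw-w64-ucrt-x86_64-htslib"),
     ("gzip", "gzip"),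
     ("tar", "tar")]

def pacmanStepA (st : List String × PySem.Set String) (tool : String) :
    List String × PySem.Set String :=
  match pacmanToolPackages.get? tool with
  | some package =>
      -- 'if package and package not in seen' (truthiness of str = nonempty)
      if package ≠ "" ∧ st.2.contains package = false then
        (st.1 ++ [package], PySem.Set.add st.2 package)
      else st
  | none => st

def pacman_packages_for_tools_py (tools : List String) : List String :=
  (tools.foldl pacmanStepA ([], PySem.Set.empty)).1

-- ===== PORT B =====
def pacmanStepB (packages : List String) (tool : String) : List String :=
  match pacmanToolPackages.get? tool with
  | some package =>
      if package ≠ "" then package :: packages.filter (fun p => p ≠ package)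
      else packages
  | none => packages

def pacman_packages_for_tools_py_alt (tools : List String) : List String :=
  tools.reverse.foldl pacmanStepB []

-- ===== PRECONDITION & SPEC =====
def Spec_pacman_packages_for_tools_py (tools : List String) (out : List String) : Prop := out = pacman_packages_for_tools_py_alt tools
instance (tools : List String) (out : List String) : Decidable (Spec_pacman_packages_for_tools_py tools out) := by unfold Spec_pacman_packages_for_tools_py; infer_instance

-- ===== CLAIM (what is proved, stated in full; the proofs are below) =====
def Claim_equal_pacman_packages_for_tools_py : Prop := ∀ (tools : List String), Dom_pacman_packages_for_tools_py tools → Spec_pacman_packages_for_tools_py tools (pacman_packages_for_tools_py tools)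

-- ===== LEMMAS AND PROOFS =====

-- The mapped-and-filtered package list both sides deduplicate.
def pacmanMapped (tools : List String) : List String :=
  (tools.filterMap (fun t => pacmanToolPackages.get? t)).filter (fun p => p ≠ "")

-- In A's loop, packages and seen always hold the same list, and each step is exactly Set.add.
theorem pacman_fold_eq (tools : List String) (s : PySem.Set String) :
    tools.foldl pacmanStepA (s, s) =
      (PySem.Set.update s (pacmanMapped tools), PySem.Set.update s (pacmanMapped tools)) := by
  induction tools generalizing s with
  | nil => simp [PySem.Set.update, pacmanMapped]
  | cons t rest ih =>
      cases hg : pacmanToolPackages.get? t with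
      | none => simpa [pacmanStepA, pacmanMapped, hg] using ih s
      | some p =>
          by_cases hp : p = ""
          · subst hp
            simpa [pacmanStepA, pacmanMapped, hg] using ih s
          · have hstep : pacmanStepA (s, s) t = (PySem.Set.add s p, PySem.Set.add s p) := by
              by_cases hc : p ∈ s <;> simp [pacmanStepA, hg, hp, PySem.Set.add, hc]
            have hmapped : pacmanMapped (t :: rest) = p :: pacmanMapped rest := by
              simp [pacmanMapped, hg, hp]
            have hupd : PySem.Set.update s (p :: pacmanMapped rest)
                = PySem.Set.update (PySem.Set.add s p) (pacmanMapped rest) := by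
              simp [PySem.Set.update]
            rw [List.foldl_cons, hstep, ih (PySem.Set.add s p), hmapped, hupd]

-- A's result is the ordered dedup (set-of-list) of the mapped list.
theorem pacman_A_eq (tools : List String) :
    pacman_packages_for_tools_py tools = PySem.Set.ofList (pacmanMapped tools) := by
  unfold pacman_packages_for_tools_py
  show (List.foldl pacmanStepA (PySem.Set.empty, PySem.Set.empty) tools).1 = _
  rw [pacman_fold_eq tools PySem.Set.empty]
  simp [PySem.Set.update, PySem.Set.ofList_eq_foldl, PySem.Set.empty]

-- B's backwards fold is the foldr of its step, which also computes the ordered dedup.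
theorem pacman_B_foldr (tools : List String) :
    tools.foldr (fun t acc => pacmanStepB acc t) [] = PySem.Set.ofList (pacmanMapped tools) := by
  induction tools with
  | nil => simp [pacmanMapped, PySem.Set.ofList]
  | cons t rest ih =>
      cases hg : pacmanToolPackages.get? t with
      | none => simpa [pacmanStepB, pacmanMapped, hg] using ih
      | some p =>
          by_cases hp : p = ""
          · subst hp
            simpa [pacmanStepB, pacmanMapped, hg] using ih
          · have hmapped : pacmanMapped (t :: rest) = p :: pacmanMapped rest := by
              simp [pacmanMapped, hg, hp]
            rw [List.foldr_cons, ih]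
            have hfun : (fun q : String => !q == p) = (fun q : String => !decide (q = p)) := by
              funext q; cases h : q == p <;> simp_all
            simp [pacmanStepB, hg, hp, hmapped, PySem.Set.ofList_cons, PySem.Set.discard, hfun]

theorem pacman_B_eq (tools : List String) :
    pacman_packages_for_tools_py_alt tools = PySem.Set.ofList (pacmanMapped tools) := by
  unfold pacman_packages_for_tools_py_alt
  rw [List.foldl_reverse]
  exact pacman_B_foldr tools

-- ===== VERDICT (by name: the statement is the Claim_ definition above) =====
theorem pacman_packages_for_tools_py_spec : Claim_equal_pacman_packages_for_tools_py := by
  intro tools _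
  unfold Spec_pacman_packages_for_tools_py
  rw [pacman_A_eq, pacman_B_eq]
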